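-- pv_equiv track=rewrite | github.com/LeeHa-Yeon/AlgorithmStudy | Programmers/BP_모의고사.py | solution
-- ===== SOURCE A (Python) =====
-- from itertools import chain, repeat
--
-- def solution(answers): # 10
--     answer = []
--     collection = []
--     people = [[1,2,3,4,5],[2,1,2,3,2,4,2,5],[3,3,1,1,2,2,4,4,5,5]] # 5
--
--     for i in range(3) :
--         p = people[i]
--         if len(answers) > len(people[i]) :
--             n = divmod(len(answers), len(people[i]))
--             if n[1] == 0:
--                 people[i] = list(chain.from_iterable(repeat(people[i],n[0])))
--             else :
--                 people[i] = list(chain.from_iterable(repeat(people[i],n[0])))+p[:n[1]]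
--         else :
--             people[i] = p[:len(answers)]
--
--     for j in range(len(answers)) :
--
--         people[0][j] = 0 if answers[j] == people[0][j] else 9
--         people[1][j] = 0 if answers[j] == people[1][j] else 9
--         people[2][j] = 0 if answers[j] == people[2][j] else 9
--
--     for k in range(3) :
--         collection.append(people[k].count(0))
--
--     for i in range(3):
--         if collection[i] == max(collection):
--             answer.append(i + 1)
--
--     return answer
-- ===== SOURCE B (Python) =====
-- def solution(answers):
--     p0 = [1, 2, 3, 4, 5]
--     p1 = [2, 1, 2, 3, 2, 4, 2, 5]
--     p2 = [3, 3, 1, 1, 2, 2, 4, 4, 5, 5]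
--     c0 = c1 = c2 = 0
--     for i, a in enumerate(answers):
--         if a == p0[i % 5]:
--             c0 += 1
--         if a == p1[i % 8]:
--             c1 += 1
--         if a == p2[i % 10]:
--             c2 += 1
--     m = max(c0, c1, c2)
--     result = []
--     if c0 == m:
--         result.append(1)
--     if c1 == m:
--         result.append(2)
--     if c2 == m:
--         result.append(3)
--     return result
-- ===== Notes on version B (the rewrite author's own statement) =====
-- stated objective: simpler
-- what changed: Instead of materialising each pattern repeated/truncated to len(answers), overwriting the copies in place with 0/9 markers and counting zeros, B keeps three integer counters and does one modular-indexed pass over enumerate(answers), then picks the maximal counters.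
import Mathlib
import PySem

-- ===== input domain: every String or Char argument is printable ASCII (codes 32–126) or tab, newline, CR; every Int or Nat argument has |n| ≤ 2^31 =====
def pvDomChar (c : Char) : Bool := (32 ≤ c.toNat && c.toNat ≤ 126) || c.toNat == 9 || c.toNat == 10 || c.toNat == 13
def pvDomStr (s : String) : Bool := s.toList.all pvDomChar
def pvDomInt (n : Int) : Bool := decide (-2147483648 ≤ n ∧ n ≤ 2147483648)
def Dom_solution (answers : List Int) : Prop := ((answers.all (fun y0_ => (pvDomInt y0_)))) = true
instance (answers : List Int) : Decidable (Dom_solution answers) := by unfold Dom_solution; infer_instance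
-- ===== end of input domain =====

-- B replaces A's expand-to-length/mark-0-9/count-zeros pipeline by a single modular-indexed
-- counting pass with three integer counters (objective: simpler; return values proved equal).


-- ===== PORT A =====
-- people[i] = pattern expanded/truncated to len(answers); divmod of the two nonnegative
-- lengths is ported with Nat division (exact for nonnegative operands).
def pvExpand (answers p : List Int) : List Int :=
  if answers.length > p.length then
    if answers.length % p.length = 0 then
      (List.replicate (answers.length / p.length) p).flatten
    else
      (List.replicate (answers.length / p.length) p).flatten
        ++ p.take (answers.length % p.length)
  else p.take answers.length

def solution (answers : List Int) : List Int :=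
  -- for i in range(3): people[i] = <expanded pattern>
  let people : List (List Int) :=
    (PySem.List.pyRange 0 3 1).foldl
      (fun ppl i => PySem.List.pySetD ppl i (pvExpand answers (PySem.List.pyGetD ppl i [])))
      [[1,2,3,4,5],[2,1,2,3,2,4,2,5],[3,3,1,1,2,2,4,4,5,5]]
  -- for j in range(len(answers)): people[t][j] = 0 if answers[j] == people[t][j] else 9, t = 0,1,2
  let people :=
    (PySem.List.pyRange 0 (answers.length : Int) 1).foldl
      (fun ppl j =>
        let stmt := fun (ppl : List (List Int)) (t : Int) =>
          let l := PySem.List.pyGetD ppl t []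
          PySem.List.pySetD ppl t
            (PySem.List.pySetD l j
              (if PySem.List.pyGetD answers j 0 == PySem.List.pyGetD l j 0 then (0:Int) else 9))
        stmt (stmt (stmt ppl 0) 1) 2)
      people
  -- for k in range(3): collection.append(people[k].count(0))
  let collection : List Int :=
    (PySem.List.pyRange 0 3 1).foldl
      (fun c k => c ++ [((PySem.List.pyGetD people k []).count 0 : Int)]) []
  -- max(collection); collection always has 3 entries, so max? is some and .getD 0 is unreachable
  let mx := (PySem.List.max? collection id).getD 0
  -- for i in range(3): if collection[i] == max(collection): answer.append(i+1)
  (PySem.List.pyRange 0 3 1).foldl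
    (fun ans i => if PySem.List.pyGetD collection i 0 == mx then ans ++ [i + 1] else ans) []

-- ===== PORT B =====
def solution_alt (answers : List Int) : List Int :=
  let c :=
    (PySem.List.enumerate answers).foldl
      (fun (c : Int × Int × Int) ia =>
        ((if ia.2 == PySem.List.pyGetD [1,2,3,4,5] (PySem.Int.mod ia.1 5) 0 then c.1 + 1 else c.1),
         (if ia.2 == PySem.List.pyGetD [2,1,2,3,2,4,2,5] (PySem.Int.mod ia.1 8) 0 then c.2.1 + 1 else c.2.1),
         (if ia.2 == PySem.List.pyGetD [3,3,1,1,2,2,4,4,5,5] (PySem.Int.mod ia.1 10) 0 then c.2.2 + 1 else c.2.2)))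
      (0, 0, 0)
  let m := max c.1 (max c.2.1 c.2.2)
  ((if c.1 == m then [1] else []) ++ (if c.2.1 == m then [2] else []) ++
    (if c.2.2 == m then [3] else []))

-- ===== PRECONDITION & SPEC =====
def Spec_solution (answers : List Int) (out : List Int) : Prop := out = solution_alt answers
instance (answers : List Int) (out : List Int) : Decidable (Spec_solution answers out) := by unfold Spec_solution; infer_instance

-- ===== CLAIM (what is proved, stated in full; the proofs are below) =====
def Claim_equal_solution : Prop := ∀ (answers : List Int), Dom_solution answers → Spec_solution answers (solution answers)

-- ===== LEMMAS AND PROOFS =====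

-- the number of positions j < ans.length where ans[j] matches p cyclically, offset s
def pvCnt (p : List Int) (s : Nat) (ans : List Int) : Int :=
  ((List.range ans.length).countP
    (fun j => ans.getD j 0 == p.getD ((s + j) % p.length) 0) : Nat)

theorem pvCnt_cons (p : List Int) (s : Nat) (a : Int) (ans : List Int) :
    pvCnt p s (a :: ans)
      = (if a == p.getD (s % p.length) 0 then 1 else 0) + pvCnt p (s + 1) ans := by
  unfold pvCnt
  simp only [List.length_cons, List.range_succ_eq_map, List.countP_cons, List.countP_map]
  have h1 : ∀ j : Nat,
      ((a :: ans).getD (Nat.succ j) 0 == p.getD ((s + Nat.succ j) % p.length) 0)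
        = (ans.getD j 0 == p.getD ((s + 1 + j) % p.length) 0) := by
    intro j
    have : s + Nat.succ j = s + 1 + j := by omega
    simp [this]
  simp only [Function.comp_def, h1]
  split_ifs <;> simp_all <;> push_cast <;> ring

-- B's fold computes the three cyclic match counts
theorem pvFoldB (ans : List Int) : ∀ (s : Nat) (c : Int × Int × Int),
    (PySem.List.enumerate ans (s : Int)).foldl
      (fun (c : Int × Int × Int) ia =>
        ((if ia.2 == PySem.List.pyGetD [1,2,3,4,5] (PySem.Int.mod ia.1 5) 0 then c.1 + 1 else c.1),
         (if ia.2 == PySem.List.pyGetD [2,1,2,3,2,4,2,5] (PySem.Int.mod ia.1 8) 0 then c.2.1 + 1 else c.2.1),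
         (if ia.2 == PySem.List.pyGetD [3,3,1,1,2,2,4,4,5,5] (PySem.Int.mod ia.1 10) 0 then c.2.2 + 1 else c.2.2)))
      c
      = (c.1 + pvCnt [1,2,3,4,5] s ans,
         c.2.1 + pvCnt [2,1,2,3,2,4,2,5] s ans,
         c.2.2 + pvCnt [3,3,1,1,2,2,4,4,5,5] s ans) := by
  induction ans with
  | nil => intro s c; simp [pvCnt, PySem.List.enumerate_nil]
  | cons a ans ih =>
    intro s c
    have hcast : ((s : Int) + 1) = ((s + 1 : Nat) : Int) := by push_cast; ring
    rw [PySem.List.enumerate_cons, List.foldl_cons, hcast, ih]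
    have hm5 : PySem.Int.mod (s : Int) 5 = ((s % 5 : Nat) : Int) := PySem.Int.mod_natCast s 5
    have hm8 : PySem.Int.mod (s : Int) 8 = ((s % 8 : Nat) : Int) := PySem.Int.mod_natCast s 8
    have hm10 : PySem.Int.mod (s : Int) 10 = ((s % 10 : Nat) : Int) := PySem.Int.mod_natCast s 10
    simp only [hm5, hm8, hm10, PySem.List.pyGetD_natCast,
      pvCnt_cons]
    have l5 : ([1,2,3,4,5] : List Int).length = 5 := by decide
    have l8 : ([2,1,2,3,2,4,2,5] : List Int).length = 8 := by decide
    have l10 : ([3,3,1,1,2,2,4,4,5,5] : List Int).length = 10 := by decide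
    simp only [l5, l8, l10]
    refine Prod.ext ?_ (Prod.ext ?_ ?_) <;> simp <;> split_ifs <;> ring

-- ---- A side ----

theorem pvLenFlattenRep (q : Nat) (p : List Int) :
    ((List.replicate q p).flatten).length = q * p.length := by
  induction q with
  | zero => simp
  | succ q ih => rw [List.replicate_succ, List.flatten_cons, List.length_append, ih]; ring

theorem pvGetDFlattenRep (p : List Int) :
    ∀ (q j : Nat), j < q * p.length →
      ((List.replicate q p).flatten).getD j 0 = p.getD (j % p.length) 0 := by
  intro q
  induction q with
  | zero => intro j h; omega
  | succ q ih =>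
    intro j h
    rw [List.replicate_succ, List.flatten_cons]
    by_cases hj : j < p.length
    · rw [List.getD_append _ _ _ _ hj, Nat.mod_eq_of_lt hj]
    · push_neg at hj
      have hmul : (q + 1) * p.length = q * p.length + p.length := by ring
      rw [List.getD_append_right _ _ _ _ hj, ih (j - p.length) (by omega),
        Nat.mod_eq_sub_mod hj]

theorem pvExpand_eq (p : List Int) (hp : p ≠ []) (answers : List Int) :
    pvExpand answers p
      = (List.range answers.length).map (fun j => p.getD (j % p.length) 0) := by
  have hlp : 0 < p.length := List.length_pos_iff.mpr hp
  unfold pvExpand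
  set n := answers.length with hn
  have hdm : p.length * (n / p.length) + n % p.length = n := Nat.div_add_mod n p.length
  have hcomm : n / p.length * p.length = p.length * (n / p.length) := Nat.mul_comm _ _
  have hmlt : n % p.length < p.length := Nat.mod_lt _ hlp
  have hlen : ((List.replicate (n / p.length) p).flatten).length
      = n / p.length * p.length := pvLenFlattenRep _ p
  split_ifs with h1 h2
  · -- repeat branch, r = 0
    apply List.ext_getElem
    · rw [hlen]; simp only [List.length_map, List.length_range]; omega
    · intro j hj1 hj2
      simp only [List.getElem_map, List.getElem_range]
      rw [← List.getD_eq_getElem _ 0 hj1, pvGetDFlattenRep p _ _ (by omega)]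
  · -- repeat-plus-prefix branch, r ≠ 0
    apply List.ext_getElem
    · rw [List.length_append, hlen, List.length_take]
      simp only [List.length_map, List.length_range]; omega
    · intro j hj1 hj2
      have hjn : j < n := by simpa using hj2
      simp only [List.getElem_map, List.getElem_range]
      rw [← List.getD_eq_getElem _ 0 hj1]
      by_cases hsmall : j < n / p.length * p.length
      · rw [List.getD_append _ _ _ _ (by omega), pvGetDFlattenRep p _ _ hsmall]
      · rw [List.getD_append_right _ _ _ _ (by omega), hlen]
        have hk : j - n / p.length * p.length < n % p.length := by omega
        have hmod : j % p.length = j - n / p.length * p.length := by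
          conv_lhs => rw [show j = p.length * (n / p.length) + (j - n / p.length * p.length)
            by omega]
          rw [Nat.mul_add_mod]
          exact Nat.mod_eq_of_lt (by omega)
        rw [hmod, List.getD_eq_getElem _ 0 (by rw [List.length_take]; omega),
          List.getElem_take, ← List.getD_eq_getElem _ 0 (by omega)]
  · -- truncate branch
    push_neg at h1
    apply List.ext_getElem
    · rw [List.length_take]; simp only [List.length_map, List.length_range]; omega
    · intro j hj1 hj2
      have hjn : j < n := by simpa using hj2
      simp only [List.getElem_map, List.getElem_range]
      rw [List.getElem_take, Nat.mod_eq_of_lt (by omega),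
        ← List.getD_eq_getElem _ 0 (by omega)]

-- set-loop over range n on a list of length n is mapIdx
theorem pvFoldlSetCons (g : Nat → Int → Int) :
    ∀ (r : List Nat) (x : Int) (t : List Int),
      r.foldl (fun l j => l.set (j+1) (g (j+1) (l.getD (j+1) 0))) (x :: t)
        = x :: r.foldl (fun l j => l.set j (g (j+1) (l.getD j 0))) t := by
  intro r
  induction r with
  | nil => intro x t; rfl
  | cons j r ih =>
    intro x t
    simp only [List.foldl_cons, List.set_cons_succ, List.getD_cons_succ, ih]

theorem pvFoldlSetRange : ∀ (n : Nat) (g : Nat → Int → Int) (e : List Int), e.length = n →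
    (List.range n).foldl (fun l j => l.set j (g j (l.getD j 0))) e = e.mapIdx g := by
  intro n
  induction n with
  | zero =>
    intro g e he
    rw [List.eq_nil_of_length_eq_zero he]; rfl
  | succ n ih =>
    intro g e he
    cases e with
    | nil => simp at he
    | cons b bs =>
      rw [List.range_succ_eq_map, List.foldl_cons, List.foldl_map]
      simp only [List.set_cons_zero, List.getD_cons_zero, Nat.succ_eq_add_one]
      rw [pvFoldlSetCons, ih (fun j v => g (j+1) v) bs (by simpa using he),
        List.mapIdx_cons]

theorem pvMapIdxMapRange (g : Nat → Int → Int) (h : Nat → Int) (n : Nat) :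
    ((List.range n).map h).mapIdx g = (List.range n).map (fun j => g j (h j)) := by
  apply List.ext_getElem
  · simp
  · intro j hj1 hj2
    simp [List.getElem_mapIdx]

-- count of 0 in the marked list is the cyclic match count
theorem pvCountMarked (ans p : List Int) :
    (((List.range ans.length).map
        (fun j => if ans.getD j 0 == p.getD (j % p.length) 0 then (0:Int) else 9)).count 0 : Int)
      = pvCnt p 0 ans := by
  unfold pvCnt
  congr 1
  rw [List.count_eq_countP, List.countP_map]
  apply List.countP_congr
  intro j _
  simp only [Function.comp_def, Nat.zero_add]
  split_ifs with h <;> simp_all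

-- pyRange-based mark fold = range-based set fold
theorem pvMarkFold (ans e : List Int) (g : Int → Int → Int) :
    (PySem.List.pyRange 0 (ans.length : Int) 1).foldl
      (fun l j => PySem.List.pySetD l j (g (PySem.List.pyGetD ans j 0) (PySem.List.pyGetD l j 0))) e
    = (List.range ans.length).foldl
      (fun l j => l.set j (g (ans.getD j 0) (l.getD j 0))) e := by
  rw [PySem.List.pyRange_one, List.foldl_map]
  have hn : (((ans.length : Int)) - 0).toNat = ans.length := by omega
  rw [hn]
  have hf : (fun (l : List Int) (k : Nat) =>
      PySem.List.pySetD l ((0:Int) + (k:Int))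
        (g (PySem.List.pyGetD ans ((0:Int) + (k:Int)) 0)
           (PySem.List.pyGetD l ((0:Int) + (k:Int)) 0)))
      = fun l k => l.set k (g (ans.getD k 0) (l.getD k 0)) := by
    funext l k
    simp
  rw [hf]

theorem pvGetD0 {α : Type} (x y z : α) (d : α) : PySem.List.pyGetD [x,y,z] 0 d = x := by
  simp [PySem.List.pyGetD, PySem.List.pyGet?, PySem.List.pyIdx?]
theorem pvGetD1 {α : Type} (x y z : α) (d : α) : PySem.List.pyGetD [x,y,z] 1 d = y := by
  simp [PySem.List.pyGetD, PySem.List.pyGet?, PySem.List.pyIdx?]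
theorem pvGetD2 {α : Type} (x y z : α) (d : α) : PySem.List.pyGetD [x,y,z] 2 d = z := by
  simp [PySem.List.pyGetD, PySem.List.pyGet?, PySem.List.pyIdx?]
theorem pvSetD0 {α : Type} (x y z v : α) : PySem.List.pySetD [x,y,z] 0 v = [v,y,z] := by
  simp [PySem.List.pySetD, PySem.List.pySet?, PySem.List.pyIdx?]
theorem pvSetD1 {α : Type} (x y z v : α) : PySem.List.pySetD [x,y,z] 1 v = [x,v,z] := by
  simp [PySem.List.pySetD, PySem.List.pySet?, PySem.List.pyIdx?]
theorem pvSetD2 {α : Type} (x y z v : α) : PySem.List.pySetD [x,y,z] 2 v = [x,y,v] := by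
  simp [PySem.List.pySetD, PySem.List.pySet?, PySem.List.pyIdx?]

theorem pvStmt3 (ans : List Int) (j : Int) (a b c : List Int) :
    (fun ppl j =>
        let stmt := fun (ppl : List (List Int)) (t : Int) =>
          let l := PySem.List.pyGetD ppl t []
          PySem.List.pySetD ppl t
            (PySem.List.pySetD l j
              (if PySem.List.pyGetD ans j 0 == PySem.List.pyGetD l j 0 then (0:Int) else 9))
        stmt (stmt (stmt ppl 0) 1) 2) [a, b, c] j
      = [PySem.List.pySetD a j
            (if PySem.List.pyGetD ans j 0 == PySem.List.pyGetD a j 0 then (0:Int) else 9),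
         PySem.List.pySetD b j
            (if PySem.List.pyGetD ans j 0 == PySem.List.pyGetD b j 0 then (0:Int) else 9),
         PySem.List.pySetD c j
            (if PySem.List.pyGetD ans j 0 == PySem.List.pyGetD c j 0 then (0:Int) else 9)] := by
  simp only [pvGetD0, pvGetD1, pvGetD2, pvSetD0, pvSetD1, pvSetD2]

theorem pvFold3 (ans : List Int) :
    ∀ (r : List Int) (a b c : List Int),
      r.foldl (fun ppl j =>
        let stmt := fun (ppl : List (List Int)) (t : Int) =>
          let l := PySem.List.pyGetD ppl t []
          PySem.List.pySetD ppl t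
            (PySem.List.pySetD l j
              (if PySem.List.pyGetD ans j 0 == PySem.List.pyGetD l j 0 then (0:Int) else 9))
        stmt (stmt (stmt ppl 0) 1) 2) [a, b, c]
      = [r.foldl (fun l j => PySem.List.pySetD l j
            (if PySem.List.pyGetD ans j 0 == PySem.List.pyGetD l j 0 then (0:Int) else 9)) a,
         r.foldl (fun l j => PySem.List.pySetD l j
            (if PySem.List.pyGetD ans j 0 == PySem.List.pyGetD l j 0 then (0:Int) else 9)) b,
         r.foldl (fun l j => PySem.List.pySetD l j
            (if PySem.List.pyGetD ans j 0 == PySem.List.pyGetD l j 0 then (0:Int) else 9)) c] := by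
  intro r
  induction r with
  | nil => intro a b c; rfl
  | cons j r ih =>
    intro a b c
    rw [List.foldl_cons, pvStmt3, ih]
    rfl

theorem pvMax3 (a b c : Int) : (PySem.List.max? [a,b,c] id).getD 0 = max a (max b c) := by
  simp only [PySem.List.max?, List.foldl_cons, List.foldl_nil, id]
  by_cases h1 : a < b
  · simp only [if_pos h1]
    by_cases h2 : b < c <;> simp [h2] <;> omega
  · simp only [if_neg h1]
    by_cases h2 : a < c <;> simp [h2] <;> omega

theorem solution_eq_counts (answers : List Int) :
    solution answers =
      (let C0 := pvCnt [1,2,3,4,5] 0 answers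
       let C1 := pvCnt [2,1,2,3,2,4,2,5] 0 answers
       let C2 := pvCnt [3,3,1,1,2,2,4,4,5,5] 0 answers
       let mx := max C0 (max C1 C2)
       ((if C0 == mx then [(1:Int)] else []) ++ (if C1 == mx then [2] else []) ++
         (if C2 == mx then [3] else []))) := by
  unfold solution
  have h3 : PySem.List.pyRange 0 3 1 = [0, 1, 2] := by decide
  rw [h3]
  simp only [List.foldl_cons, List.foldl_nil, pvGetD0, pvGetD1, pvGetD2,
    pvSetD0, pvSetD1, pvSetD2]
  rw [pvExpand_eq [1,2,3,4,5] (by decide), pvExpand_eq [2,1,2,3,2,4,2,5] (by decide),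
    pvExpand_eq [3,3,1,1,2,2,4,4,5,5] (by decide), pvFold3,
    pvMarkFold answers _ (fun x y => if x == y then (0:Int) else 9),
    pvMarkFold answers _ (fun x y => if x == y then (0:Int) else 9),
    pvMarkFold answers _ (fun x y => if x == y then (0:Int) else 9),
    pvFoldlSetRange answers.length (fun j v => if answers.getD j 0 == v then (0:Int) else 9) _
      (by simp),
    pvFoldlSetRange answers.length (fun j v => if answers.getD j 0 == v then (0:Int) else 9) _
      (by simp),
    pvFoldlSetRange answers.length (fun j v => if answers.getD j 0 == v then (0:Int) else 9) _
      (by simp),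
    pvMapIdxMapRange, pvMapIdxMapRange, pvMapIdxMapRange,
    pvGetD0, pvGetD1, pvGetD2]
  simp only [List.nil_append, List.cons_append]
  rw [pvCountMarked answers [1,2,3,4,5],
    pvCountMarked answers [2,1,2,3,2,4,2,5],
    pvCountMarked answers [3,3,1,1,2,2,4,4,5,5],
    pvGetD0, pvGetD1, pvGetD2, pvMax3]
  split_ifs <;> norm_num
theorem solution_alt_eq_counts (answers : List Int) :
    solution_alt answers =
      (let C0 := pvCnt [1,2,3,4,5] 0 answers
       let C1 := pvCnt [2,1,2,3,2,4,2,5] 0 answers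
       let C2 := pvCnt [3,3,1,1,2,2,4,4,5,5] 0 answers
       let mx := max C0 (max C1 C2)
       ((if C0 == mx then [(1:Int)] else []) ++ (if C1 == mx then [2] else []) ++
         (if C2 == mx then [3] else []))) := by
  unfold solution_alt
  have h := pvFoldB answers 0 (0, 0, 0)
  simp only [Nat.cast_zero, zero_add] at h
  rw [h]

-- ===== VERDICT (by name: the statement is the Claim_ definition above) =====
theorem solution_spec : Claim_equal_solution := by
  intro answers _
  unfold Spec_solution
  rw [solution_eq_counts, solution_alt_eq_counts]
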